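-- pv_equiv track=rewrite | github.com/barrettMCW/omero-upload-csv | omero-upload-csv.py | analyze_row_conflicts
-- ===== SOURCE A (Python) =====
-- from typing import Dict, List, Optional, Tuple
--
-- def _filtered_kv_from_row(row: Dict[str, str]) -> Dict[str, str]:
--     return {
--         k: v
--         for k, v in row.items()
--         if k not in ["subject_id", "sample_id"] and str(v).strip() != ""
--     }
--
-- def analyze_row_conflicts(rows: List[Dict[str, str]], row_idxs: List[int]) -> List[str]:
--     """Return list of keys that have conflicting values across the given rows.
--
--     row_idxs are CSV line numbers (2-based). Index into rows list by subtracting 2.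
--     """
--     key_values = {}
--     conflicts = set()
--     for row_idx in row_idxs:
--         row = rows[row_idx - 2]
--         filtered = _filtered_kv_from_row(row)
--         for k, v in filtered.items():
--             v_str = str(v)
--             if k in key_values and key_values[k] != v_str:
--                 conflicts.add(k)
--             key_values.setdefault(k, v_str)
--     return sorted(conflicts)
-- ===== SOURCE B (Python) =====
-- def _filtered_kv_from_row(row):
--     return {
--         k: v
--         for k, v in row.items()
--         if k not in ["subject_id", "sample_id"] and str(v).strip() != ""
--     }
--
-- def analyze_row_conflicts(rows, row_idxs):
--     """Return list of keys that have conflicting values across the given rows.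
--
--     Flattens all filtered (key, str(value)) cells of the selected rows into one
--     list, then finds conflicting keys by brute-force pairwise comparison:
--     a key conflicts iff two of its cells carry different values.
--     """
--     pairs = [(k, str(v))
--              for row_idx in row_idxs
--              for k, v in _filtered_kv_from_row(rows[row_idx - 2]).items()]
--     return sorted({k for (k, v) in pairs
--                      for (k2, v2) in pairs if k2 == k and v2 != v})
-- ===== Notes on version B (the rewrite author's own statement) =====
-- stated objective: alternative
-- what changed: A tracks state in one pass (first-value dict plus incrementally grown conflict set); B keeps no dict at all: it flattens all filtered (key, str(value)) cells into one list and decides conflicts by brute-force pairwise comparison of that list, then sorts the resulting set.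
import Mathlib
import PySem

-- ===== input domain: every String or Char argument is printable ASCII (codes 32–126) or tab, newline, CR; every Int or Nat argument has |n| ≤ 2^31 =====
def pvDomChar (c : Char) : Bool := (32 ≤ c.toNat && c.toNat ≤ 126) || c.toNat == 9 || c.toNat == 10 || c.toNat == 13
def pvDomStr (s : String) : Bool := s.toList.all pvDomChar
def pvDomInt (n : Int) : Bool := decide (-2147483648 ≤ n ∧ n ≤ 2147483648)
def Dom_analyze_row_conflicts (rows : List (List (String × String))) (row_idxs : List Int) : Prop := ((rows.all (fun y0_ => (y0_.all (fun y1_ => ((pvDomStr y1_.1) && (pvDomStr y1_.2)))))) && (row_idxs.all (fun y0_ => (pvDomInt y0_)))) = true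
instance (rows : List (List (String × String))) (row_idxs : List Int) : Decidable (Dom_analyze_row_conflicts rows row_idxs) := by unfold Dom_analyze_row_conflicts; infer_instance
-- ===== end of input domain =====

-- B is an ALTERNATIVE algorithm: no dict at all — it flattens all filtered cells into one pair list
-- and finds conflicting keys by brute-force pairwise comparison; equal return value on Pre_ (valid indices).

-- ===== PORT A =====
-- shared helper: the Python helper _filtered_kv_from_row, used verbatim by both A and B
def pvFilteredRow (row : List (String × String)) : PySem.Dict String String :=
  (PySem.Dict.ofList row).items.foldl
    (fun d p =>
      if (!(p.1 == "subject_id" || p.1 == "sample_id") && (PySem.Str.strip p.2 != "")) then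
        d.insert p.1 p.2
      else d)
    PySem.Dict.empty

-- one inner-loop step of A: check conflict against key_values, then setdefault
def pvStepA (st : PySem.Dict String String × PySem.Set String) (p : String × String) :
    PySem.Dict String String × PySem.Set String :=
  let conflicts :=
    match st.1.get? p.1 with
    | some w => if w ≠ p.2 then PySem.Set.add st.2 p.1 else st.2
    | none => st.2
  (st.1.setdefault p.1 p.2, conflicts)

def analyze_row_conflicts (rows : List (List (String × String))) (row_idxs : List Int) : List String :=
  let final := row_idxs.foldl
    (fun st i =>
      let row := (PySem.List.pyGet? rows (i - 2)).getD []   -- Pre_ makes pyGet? return some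
      (pvFilteredRow row).items.foldl pvStepA st)
    (PySem.Dict.empty, PySem.Set.empty)
  PySem.List.sorted final.2 (fun x => x) false

-- ===== PORT B =====
def analyze_row_conflicts_alt (rows : List (List (String × String))) (row_idxs : List Int) : List String :=
  -- the flat list comprehension of all filtered (k, v) cells of the selected rows
  let pairs := row_idxs.flatMap
    (fun i => (pvFilteredRow ((PySem.List.pyGet? rows (i - 2)).getD [])).items)
  -- the set comprehension {k for (k, v) in pairs for (k2, v2) in pairs if k2 == k and v2 != v}
  let conflicts := PySem.Set.ofList
    (pairs.flatMap (fun p => (pairs.filter (fun q => q.1 == p.1 && q.2 != p.2)).map (fun _ => p.1)))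
  PySem.List.sorted conflicts (fun x => x) false

-- ===== PRECONDITION & SPEC =====
-- Pre_ excludes exactly the inputs where rows[row_idx - 2] raises IndexError in A (and in B alike).
def Pre_analyze_row_conflicts (rows : List (List (String × String))) (row_idxs : List Int) : Prop :=
  ∀ i ∈ row_idxs, PySem.Raise.InRange rows.length (i - 2)
instance (rows : List (List (String × String))) (row_idxs : List Int) : Decidable (Pre_analyze_row_conflicts rows row_idxs) := by unfold Pre_analyze_row_conflicts; infer_instance

def pvWitness_analyze_row_conflicts : (List (List (String × String))) × List Int :=
  ([[("a", "1"), ("b", "2")], [("a", "3")]], [2, 3])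

def Spec_analyze_row_conflicts (rows : List (List (String × String))) (row_idxs : List Int) (out : List String) : Prop := out = analyze_row_conflicts_alt rows row_idxs
instance (rows : List (List (String × String))) (row_idxs : List Int) (out : List String) : Decidable (Spec_analyze_row_conflicts rows row_idxs out) := by unfold Spec_analyze_row_conflicts; infer_instance

-- ===== CLAIM (what is proved, stated in full; the proofs are below) =====
def Claim_equal_analyze_row_conflicts : Prop := ∀ (rows : List (List (String × String))) (row_idxs : List Int), Dom_analyze_row_conflicts rows row_idxs → Pre_analyze_row_conflicts rows row_idxs → Spec_analyze_row_conflicts rows row_idxs (analyze_row_conflicts rows row_idxs)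

-- ===== LEMMAS AND PROOFS =====

-- first value recorded for key k among the pairs of L (A's reference value)
def pvFirstVal (L : List (String × String)) (k : String) : Option String :=
  (L.find? (fun p => p.1 == k)).map (·.2)

lemma pvFirstVal_mem {L : List (String × String)} {k u : String}
    (h : pvFirstVal L k = some u) : (k, u) ∈ L := by
  simp only [pvFirstVal, Option.map_eq_some_iff] at h
  obtain ⟨⟨a, b⟩, hf, hb⟩ := h
  have hp := List.find?_some hf
  have hm := List.mem_of_find?_eq_some hf
  simp only [beq_iff_eq] at hp
  subst hp; subst hb; exact hm

lemma pvFirstVal_isSome {L : List (String × String)} {k v : String}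
    (h : (k, v) ∈ L) : ∃ u, pvFirstVal L k = some u := by
  have : (L.find? (fun p => p.1 == k)).isSome := by
    apply List.find?_isSome.mpr
    exact ⟨(k, v), h, by simp⟩
  obtain ⟨p, hp⟩ := Option.isSome_iff_exists.mp this
  exact ⟨p.2, by simp [pvFirstVal, hp]⟩

-- the two conflict characterisations are the same condition
lemma pvConflict_iff (L : List (String × String)) (k : String) :
    (∃ v, (k, v) ∈ L ∧ some v ≠ pvFirstVal L k) ↔
    (∃ v w, (k, v) ∈ L ∧ (k, w) ∈ L ∧ w ≠ v) := by
  constructor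
  · rintro ⟨v, hv, hne⟩
    obtain ⟨u, hu⟩ := pvFirstVal_isSome hv
    refine ⟨v, u, hv, pvFirstVal_mem hu, ?_⟩
    intro h; subst h; exact hne hu.symm
  · rintro ⟨v, w, hv, hw, hne⟩
    obtain ⟨u, hu⟩ := pvFirstVal_isSome hv
    by_cases hvu : v = u
    · subst hvu
      exact ⟨w, hw, by rw [hu]; exact fun h => hne (Option.some.inj h)⟩
    · exact ⟨v, hv, by rw [hu]; exact fun h => hvu (Option.some.inj h)⟩

-- membership in B's comprehension list
lemma pvB_mem (L : List (String × String)) (k : String) :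
    k ∈ L.flatMap (fun p => (L.filter (fun q => q.1 == p.1 && q.2 != p.2)).map (fun _ => p.1)) ↔
    ∃ v w, (k, v) ∈ L ∧ (k, w) ∈ L ∧ w ≠ v := by
  simp only [List.mem_flatMap, List.mem_map, List.mem_filter, Bool.and_eq_true, beq_iff_eq,
    bne_iff_ne]
  constructor
  · rintro ⟨p, hp, q, ⟨hq, hk, hne⟩, hpk⟩
    obtain ⟨a, b⟩ := p; obtain ⟨c, d⟩ := q
    simp only at hk hne hpk
    subst hpk; subst hk
    exact ⟨b, d, hp, hq, hne⟩
  · rintro ⟨v, w, hv, hw, hne⟩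
    exact ⟨(k, v), hv, (k, w), ⟨hw, rfl, hne⟩, rfl⟩

-- ===== A-side invariant =====
lemma pvA_inv (L : List (String × String)) (k : String)
    (kv : PySem.Dict String String) (cf : PySem.Set String) :
    (L.foldl pvStepA (kv, cf)).1.get? k = (kv.get? k).or (pvFirstVal L k) ∧
    (k ∈ (L.foldl pvStepA (kv, cf)).2 ↔
      k ∈ cf ∨ ∃ v, (k, v) ∈ L ∧ some v ≠ (kv.get? k).or (pvFirstVal L k)) := by
  induction L generalizing kv cf with
  | nil => simp [pvFirstVal]
  | cons p L' ih =>
    obtain ⟨a, b⟩ := p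
    rw [List.foldl_cons]
    have hfst : pvStepA (kv, cf) (a, b) = (kv.setdefault a b, (pvStepA (kv, cf) (a, b)).2) := rfl
    rw [hfst]
    obtain ⟨ih1, ih2⟩ := ih (kv.setdefault a b) ((pvStepA (kv, cf) (a, b)).2)
    have hkv' : (kv.setdefault a b).get? k =
        if k = a then some ((kv.get? a).getD b) else kv.get? k := by
      by_cases hka : k = a
      · rw [if_pos hka, hka]; exact PySem.Dict.get?_setdefault_self kv a b
      · rw [if_neg hka]; exact PySem.Dict.get?_setdefault_of_ne kv b hka
    by_cases hak : a = k
    · subst hak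
      rw [if_pos rfl] at hkv'
      have hfv : pvFirstVal ((a, b) :: L') a = some b := by simp [pvFirstVal, List.find?]
      rw [hfv]
      cases hga : kv.get? a with
      | none =>
        rw [hkv', hga] at ih1 ih2
        simp only [Option.getD_none, Option.some_or] at ih1 ih2
        have hS : (pvStepA (kv, cf) (a, b)).2 = cf := by simp [pvStepA, hga]
        refine ⟨by rw [ih1]; simp, ?_⟩
        rw [ih2, hS]
        simp only [Option.none_or, List.mem_cons]
        constructor
        · rintro (h | ⟨v, hv, hne⟩)
          · exact Or.inl h
          · exact Or.inr ⟨v, Or.inr hv, hne⟩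
        · rintro (h | ⟨v, hveq | hv, hne⟩)
          · exact Or.inl h
          · have hvb : v = b := by simpa using congrArg Prod.snd hveq
            exact absurd (by rw [hvb]) hne
          · exact Or.inr ⟨v, hv, hne⟩
      | some w =>
        rw [hkv', hga] at ih1 ih2
        simp only [Option.getD_some, Option.some_or] at ih1 ih2
        have hS : ∀ x, x ∈ (pvStepA (kv, cf) (a, b)).2 ↔ x ∈ cf ∨ (x = a ∧ w ≠ b) := by
          intro x
          simp only [pvStepA, hga]
          by_cases hwb : w = b
          · rw [if_neg (by simp [hwb])]
            simp [hwb]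
          · rw [if_pos hwb]
            simp [PySem.Set.mem_add]
            tauto
        refine ⟨by rw [ih1]; simp, ?_⟩
        rw [ih2, hS a]
        simp only [Option.some_or, List.mem_cons]
        constructor
        · rintro ((h | ⟨-, hwb⟩) | ⟨v, hv, hne⟩)
          · exact Or.inl h
          · exact Or.inr ⟨b, Or.inl rfl, fun hh => hwb (Option.some.inj hh).symm⟩
          · exact Or.inr ⟨v, Or.inr hv, hne⟩
        · rintro (h | ⟨v, hveq | hv, hne⟩)
          · exact Or.inl (Or.inl h)
          · have hvb : v = b := by simpa using congrArg Prod.snd hveq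
            exact Or.inl (Or.inr ⟨by trivial, fun hh => hne (by rw [hvb, hh])⟩)
          · exact Or.inr ⟨v, hv, hne⟩
    · rw [if_neg (fun h => hak h.symm)] at hkv'
      have hfv : pvFirstVal ((a, b) :: L') k = pvFirstVal L' k := by
        simp [pvFirstVal, List.find?, show (a == k) = false by simp [hak]]
      have hcfm : k ∈ (pvStepA (kv, cf) (a, b)).2 ↔ k ∈ cf := by
        cases hga : kv.get? a with
        | none => simp [pvStepA, hga]
        | some w =>
          simp only [pvStepA, hga]
          by_cases hwb : w = b
          · rw [if_neg (by simp [hwb])]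
          · rw [if_pos hwb]
            simp [PySem.Set.mem_add]
            intro h; exact absurd h.symm hak
      rw [hkv'] at ih1 ih2
      rw [hcfm] at ih2
      refine ⟨by rw [ih1, hfv], ?_⟩
      rw [ih2, hfv]
      simp only [List.mem_cons]
      constructor
      · rintro (h | ⟨v, hv, hne⟩)
        · exact Or.inl h
        · exact Or.inr ⟨v, Or.inr hv, hne⟩
      · rintro (h | ⟨v, hveq | hv, hne⟩)
        · exact Or.inl h
        · have hka : k = a := by simpa using congrArg Prod.fst hveq
          exact absurd hka.symm hak
        · exact Or.inr ⟨v, hv, hne⟩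

lemma pvA_nodup (L : List (String × String)) (kv : PySem.Dict String String)
    (cf : PySem.Set String) (h : cf.Nodup) : (L.foldl pvStepA (kv, cf)).2.Nodup := by
  induction L generalizing kv cf with
  | nil => exact h
  | cons p L' ih =>
    rw [List.foldl_cons]
    have : (pvStepA (kv, cf) p).2.Nodup := by
      cases hga : kv.get? p.1 with
      | none => simpa [pvStepA, hga] using h
      | some w =>
        by_cases hwb : w = p.2
        · simpa [pvStepA, hga, hwb] using h
        · simpa [pvStepA, hga, hwb] using PySem.Set.nodup_add cf p.1 h
    have hrw : pvStepA (kv, cf) p = ((pvStepA (kv, cf) p).1, (pvStepA (kv, cf) p).2) := rfl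
    rw [hrw]
    exact ih _ _ this

-- ===== main =====
theorem analyze_row_conflicts_spec : Claim_equal_analyze_row_conflicts := by
  intro rows row_idxs _hdom _hpre
  unfold Spec_analyze_row_conflicts
  show analyze_row_conflicts rows row_idxs = analyze_row_conflicts_alt rows row_idxs
  unfold analyze_row_conflicts analyze_row_conflicts_alt
  rw [← List.foldl_flatMap (f := fun i => (pvFilteredRow ((PySem.List.pyGet? rows (i - 2)).getD [])).items)]
  set L := row_idxs.flatMap (fun i => (pvFilteredRow ((PySem.List.pyGet? rows (i - 2)).getD [])).items) with hL
  rw [PySem.List.sorted_id_eq_sorted_id_iff_perm]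
  apply (List.perm_ext_iff_of_nodup
    (pvA_nodup L PySem.Dict.empty PySem.Set.empty (by simp [PySem.Set.empty]))
    (PySem.Set.nodup_ofList _)).mpr
  intro k
  obtain ⟨_, hcf⟩ := pvA_inv L k PySem.Dict.empty PySem.Set.empty
  rw [hcf, PySem.Set.mem_ofList, pvB_mem]
  simp only [PySem.Dict.get?_empty, Option.none_or, PySem.Set.empty, List.not_mem_nil, false_or]
  exact pvConflict_iff L k
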